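-- pv_equiv track=rewrite | github.com/chyoan/Coding-Exercises | Python/w3resource/Python Basic/Programming Puzzles/even_length_sort.py | even_length_sort
-- ===== SOURCE A (Python) =====
-- def even_length_sort(lst):
--     lst.sort()
--     even_words = []
--     for item in lst:
--         if len(item) % 2 == 0:
--             even_words.append(item)
--     even_words.sort(key=len)
--     return even_words
-- ===== SOURCE B (Python) =====
-- def even_length_sort(lst):
--     # Same observable mutation as A: sort the argument in place (alphabetical).
--     lst.sort()
--     buckets = {}
--     for item in lst:
--         if len(item) % 2 == 0:
--             buckets.setdefault(len(item), []).append(item)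
--     result = []
--     for length in sorted(buckets):
--         result += buckets[length]
--     return result
-- ===== Notes on version B (the rewrite author's own statement) =====
-- stated objective: alternative
-- what changed: Replaces A's second sort (even_words.sort(key=len)) by grouping the even-length words into a length-keyed bucket dict during one pass over the sorted list and concatenating the buckets in ascending length order.
import Mathlib
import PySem

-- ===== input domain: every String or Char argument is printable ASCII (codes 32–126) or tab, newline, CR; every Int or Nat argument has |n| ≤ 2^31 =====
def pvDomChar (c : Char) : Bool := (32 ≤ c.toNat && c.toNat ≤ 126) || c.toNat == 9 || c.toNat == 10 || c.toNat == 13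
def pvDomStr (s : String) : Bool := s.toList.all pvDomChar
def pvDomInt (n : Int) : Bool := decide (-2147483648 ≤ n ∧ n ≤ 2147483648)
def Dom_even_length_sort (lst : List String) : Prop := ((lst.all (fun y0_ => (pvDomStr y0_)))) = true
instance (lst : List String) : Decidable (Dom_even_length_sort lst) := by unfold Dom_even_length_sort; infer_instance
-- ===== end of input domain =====

-- B groups the even-length words by length into a dict of buckets and concatenates the buckets in
-- ascending length order, instead of A's second sort(key=len); return values agree everywhere.
-- Both A and B sort the argument list in place the same way (the theorem is about the return value).

-- ===== PORT A =====
def even_length_sort (lst : List String) : List String :=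
  let lst1 := PySem.List.sorted lst (fun x => x) false
  let even_words := lst1.foldl
    (fun acc item => if PySem.Int.mod (PySem.Str.len item) 2 == 0 then acc ++ [item] else acc) []
  PySem.List.sorted even_words (fun w => PySem.Str.len w) false

-- ===== PORT B =====
def even_length_sort_alt (lst : List String) : List String :=
  let lst1 := PySem.List.sorted lst (fun x => x) false
  -- buckets.setdefault(len(item), []).append(item)  ==  modify (len item) [] (· ++ [item])
  let buckets := lst1.foldl
    (fun d item => if PySem.Int.mod (PySem.Str.len item) 2 == 0 then
        d.modify (PySem.Str.len item) [] (fun ws => ws ++ [item]) else d)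
    (PySem.Dict.empty)
  -- for length in sorted(buckets): result += buckets[length]   (length is a key of buckets, so buckets[length] = getD)
  (PySem.List.sorted buckets.keys (fun k => k) false).foldl
    (fun acc k => acc ++ buckets.getD k []) []

-- ===== PRECONDITION & SPEC =====
def Spec_even_length_sort (lst : List String) (out : List String) : Prop := out = even_length_sort_alt lst
instance (lst : List String) (out : List String) : Decidable (Spec_even_length_sort lst out) := by unfold Spec_even_length_sort; infer_instance

-- ===== CLAIM (what is proved, stated in full; the proofs are below) =====
def Claim_equal_even_length_sort : Prop := ∀ (lst : List String), Dom_even_length_sort lst → Spec_even_length_sort lst (even_length_sort lst)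

-- ===== LEMMAS AND PROOFS =====

theorem insertBy_append_left {α : Type} (before : α → α → Bool) (x : α) (l1 l2 : List α)
    (h : ∀ y ∈ l1, before x y = false) :
    PySem.List.insertBy before x (l1 ++ l2) = l1 ++ PySem.List.insertBy before x l2 := by
  induction l1 with
  | nil => simp
  | cons y t ih =>
    simp only [List.cons_append, PySem.List.insertBy, h y (by simp)]
    simp only [Bool.false_eq_true, if_false, List.cons.injEq, true_and]
    exact ih (fun z hz => h z (by simp [hz]))

theorem insertBy_all_before {α : Type} (before : α → α → Bool) (x : α) (l : List α)
    (h : ∀ y ∈ l, before x y = true) :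
    PySem.List.insertBy before x l = x :: l := by
  cases l with
  | nil => rfl
  | cons y t => simp [PySem.List.insertBy, h y (by simp)]

theorem insertBy_flatMap_buckets {α : Type} (key : α → Int) (x : α) :
    ∀ (ks : List Int) (F : Int → List α),
    ks.Pairwise (· < ·) →
    (∀ k ∈ ks, ∀ y ∈ F k, key y = k) →
    (∀ k ∈ ks, F k ≠ []) →
    (key x ∉ ks → F (key x) = []) →
    PySem.List.insertBy (fun a b => decide (key a < key b)) x (ks.flatMap F)
      = (if key x ∈ ks then ks else PySem.List.insertBy (fun a b => decide (a < b)) (key x) ks).flatMap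
          (fun k => if k = key x then F k ++ [x] else F k) := by
  intro ks
  induction ks with
  | nil =>
    intro F _ _ _ hF0
    simp [PySem.List.insertBy, hF0 (by simp)]
  | cons k kt ih =>
    intro F hp hFk hFne hF0
    have hk : ∀ j ∈ kt, k < j := (List.pairwise_cons.mp hp).1
    have hpt : kt.Pairwise (· < ·) := (List.pairwise_cons.mp hp).2
    have hflat : ∀ y ∈ kt.flatMap F, ∃ j ∈ kt, key y = j := by
      intro y hy
      rcases List.mem_flatMap.mp hy with ⟨j, hj, hyj⟩
      exact ⟨j, hj, hFk j (by simp [hj]) y hyj⟩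
    rcases lt_trichotomy (key x) k with hlt | heq | hgt
    · -- key x < k : x goes to the very front, as a fresh first bucket
      have hnm : key x ∉ k :: kt := by
        intro hm
        rcases List.mem_cons.mp hm with h1 | h2
        · omega
        · exact absurd (hk _ h2) (by omega)
      have h0 : F (key x) = [] := hF0 hnm
      have hkt : List.flatMap (fun j => if j = key x then F j ++ [x] else F j) kt
          = List.flatMap F kt :=
        List.flatMap_congr (fun j hj => by have := hk j hj; rw [if_neg (by omega)])
      rw [insertBy_all_before]
      · rw [if_neg hnm,
          show PySem.List.insertBy (fun a b => decide (a < b)) (key x) (k :: kt)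
              = key x :: k :: kt by simp [PySem.List.insertBy, hlt]]
        simp [List.flatMap_cons, h0, if_neg (show ¬ (k = key x) by omega), hkt]
      · intro y hy
        rcases List.mem_flatMap.mp hy with ⟨j, hj, hyj⟩
        have hyk := hFk j hj y hyj
        rcases List.mem_cons.mp hj with h1 | h2
        · simp only [hyk, h1, decide_eq_true_eq]; omega
        · have := hk j h2
          simp only [hyk, decide_eq_true_eq]; omega
    · -- key x = k : x appended to the k-bucket
      have hmem : key x ∈ k :: kt := by simp [heq]
      have hkt : List.flatMap (fun j => if j = key x then F j ++ [x] else F j) kt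
          = List.flatMap F kt :=
        List.flatMap_congr (fun j hj => by have := hk j hj; rw [if_neg (by omega)])
      rw [List.flatMap_cons, insertBy_append_left _ _ _ _
          (fun y hy => by have := hFk k (by simp) y hy
                          simp only [this, decide_eq_false_iff_not]; omega),
        insertBy_all_before _ _ _
          (fun y hy => by rcases hflat y hy with ⟨j, hj, hyj⟩
                          have := hk j hj
                          simp only [hyj, decide_eq_true_eq]; omega),
        if_pos hmem, List.flatMap_cons, if_pos heq.symm, hkt]
      simp
    · -- k < key x : skip the k-bucket and recurse
      have hne : ¬ (k = key x) := by omega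
      have hF0' : key x ∉ kt → F (key x) = [] := fun h =>
        hF0 (by intro hc
                rcases List.mem_cons.mp hc with h1 | h2
                · omega
                · exact h h2)
      rw [List.flatMap_cons, insertBy_append_left _ _ _ _
          (fun y hy => by have := hFk k (by simp) y hy
                          simp only [this, decide_eq_false_iff_not]; omega),
        ih F hpt (fun j hj => hFk j (by simp [hj])) (fun j hj => hFne j (by simp [hj])) hF0']
      by_cases hm : key x ∈ kt
      · rw [if_pos hm, if_pos (by simp [hm]), List.flatMap_cons, if_neg hne]
      · rw [if_neg hm, if_neg (by
            intro hc
            rcases List.mem_cons.mp hc with h1 | h2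
            · omega
            · exact hm h2),
          show PySem.List.insertBy (fun a b => decide (a < b)) (key x) (k :: kt)
              = k :: PySem.List.insertBy (fun a b => decide (a < b)) (key x) kt by
            simp [PySem.List.insertBy]; omega,
          List.flatMap_cons, if_neg hne]

theorem stable_sort_eq_buckets {α : Type} (key : α → Int) (xs : List α) :
    PySem.List.sorted xs key false
      = (PySem.List.sorted (PySem.List.dedup (xs.map key)) (fun k => k) false).flatMap
          (fun k => xs.filter (fun y => key y == k)) := by
  induction xs using List.reverseRecOn with
  | nil => rfl
  | append_singleton xs x ih =>
    have hstep : ∀ (l : List α) (a : α),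
        PySem.List.sorted (l ++ [a]) key false
          = PySem.List.insertBy (fun u v => decide (key u < key v)) a
              (PySem.List.sorted l key false) := by
      intro l a
      rw [PySem.List.sorted_eq_foldl_insertBy, PySem.List.sorted_eq_foldl_insertBy,
        List.foldl_append]
      rfl
    have hstepI : ∀ (l : List Int) (a : Int),
        PySem.List.sorted (l ++ [a]) (fun k => k) false
          = PySem.List.insertBy (fun u v => decide (u < v)) a
              (PySem.List.sorted l (fun k => k) false) := by
      intro l a
      rw [PySem.List.sorted_eq_foldl_insertBy, PySem.List.sorted_eq_foldl_insertBy,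
        List.foldl_append]
      rfl
    set m := xs.map key with hm
    set ks := PySem.List.sorted (PySem.List.dedup m) (fun k => k) false with hks
    set F : Int → List α := fun k => xs.filter (fun y => key y == k) with hF
    have hmemks : ∀ k, k ∈ ks ↔ k ∈ m := by
      intro k
      rw [hks, PySem.List.mem_sorted]
      exact PySem.Set.mem_ofList m k
    have hpair : ks.Pairwise (· < ·) := PySem.List.sorted_ofList_pairwise_lt m
    have hFk : ∀ k ∈ ks, ∀ y ∈ F k, key y = k := by
      intro k _ y hy
      rw [hF] at hy
      simp only [List.mem_filter] at hy
      exact beq_iff_eq.mp hy.2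
    have hFne : ∀ k ∈ ks, F k ≠ [] := by
      intro k hkk
      rcases List.mem_map.mp ((hmemks k).mp hkk) with ⟨y, hy, hyk⟩
      rw [hF]
      exact List.ne_nil_of_mem (List.mem_filter.mpr ⟨hy, by simp [hyk]⟩)
    have hF0 : key x ∉ ks → F (key x) = [] := by
      intro hnm
      rw [hF, List.filter_eq_nil_iff]
      intro y hy hb
      exact hnm ((hmemks _).mpr (List.mem_map.mpr ⟨y, hy, beq_iff_eq.mp hb⟩))
    -- new key list
    have hdedup : PySem.List.dedup ((xs ++ [x]).map key)
        = PySem.Set.add (PySem.List.dedup m) (key x) := by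
      rw [List.map_append, PySem.List.dedup, PySem.Set.ofList_eq_foldl, List.foldl_append]
      rw [PySem.List.dedup, PySem.Set.ofList_eq_foldl]
      rfl
    -- new buckets
    have hbucket : (fun k => (xs ++ [x]).filter (fun y => key y == k))
        = fun k => if k = key x then F k ++ [x] else F k := by
      funext k
      rw [List.filter_append]
      by_cases h : k = key x
      · simp [h, hF]
      · simp only [List.filter_cons, List.filter_nil]
        rw [if_neg (by simp [beq_iff_eq]; omega), List.append_nil, hF]
        rw [if_neg h]
    rw [hstep, ih, hbucket,
      insertBy_flatMap_buckets key x ks F hpair hFk hFne hF0, hdedup]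
    by_cases hmem : key x ∈ ks
    · rw [if_pos hmem]
      have : PySem.Set.add (PySem.List.dedup m) (key x) = PySem.List.dedup m := by
        rw [PySem.Set.add]
        rw [if_pos ?_]
        simp only [PySem.Set.contains, List.contains_eq_mem, PySem.List.dedup,
          decide_eq_true_eq]
        exact (PySem.Set.mem_ofList m (key x)).mpr ((hmemks _).mp hmem)
      rw [this, ← hks]
    · rw [if_neg hmem]
      have : PySem.Set.add (PySem.List.dedup m) (key x) = PySem.List.dedup m ++ [key x] := by
        rw [PySem.Set.add, if_neg ?_]
        simp only [PySem.Set.contains, List.contains_eq_mem, PySem.List.dedup,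
          decide_eq_true_eq]
        exact fun hc => hmem ((hmemks _).mpr ((PySem.Set.mem_ofList m (key x)).mp hc))
      rw [this, hstepI, ← hks]

-- ===== VERDICT (by name: the statement is the Claim_ definition above) =====
theorem even_length_sort_spec : Claim_equal_even_length_sort := by
  intro lst _
  unfold Spec_even_length_sort
  unfold even_length_sort even_length_sort_alt
  simp only []
  set lst1 := PySem.List.sorted lst (fun x => x) false with hlst1
  set p : String → Bool := fun item => PySem.Int.mod (PySem.Str.len item) 2 == 0 with hp
  set evens := lst1.filter p with hevens
  -- A side: the accumulation loop is a filter
  have hA : lst1.foldl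
      (fun acc item => if p item then acc ++ [item] else acc) [] = evens := by
    rw [show (fun (acc : List String) item => if p item then acc ++ [item] else acc)
          = fun acc item => if p item then acc ++ [(fun x => x) item] else acc by rfl,
      PySem.List.foldl_append_if, List.map_id', List.nil_append]
  rw [hA]
  -- B side: the bucket dict
  have hB : lst1.foldl
      (fun d item => if p item then
          d.modify (PySem.Str.len item) [] (fun ws => ws ++ [item]) else d)
      (PySem.Dict.empty)
    = evens.foldl (fun d item => d.modify (PySem.Str.len item) [] (fun ws => ws ++ [item]))
        (PySem.Dict.empty) := by
    rw [PySem.List.foldl_if_eq_foldl_filter]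
  rw [hB]
  set d := evens.foldl (fun d item => d.modify (PySem.Str.len item) [] (fun ws => ws ++ [item]))
      (PySem.Dict.empty) with hd
  have hkeys : d.keys = PySem.List.dedup (evens.map (fun w => PySem.Str.len w)) := by
    rw [hd, PySem.Dict.keys_foldl_modify_key evens (fun w => PySem.Str.len w) []
        (fun _ item ws => ws ++ [item]) PySem.Dict.empty, PySem.Dict.keys_empty,
      PySem.List.dedup, PySem.Set.ofList_eq_foldl]
    rfl
  have hmap : d = (evens.map (fun w => (PySem.Str.len w, w))).foldl
      (fun d p => d.modify p.1 [] (fun ws => ws ++ [p.2])) PySem.Dict.empty := by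
    rw [List.foldl_map]
  have hgetD : ∀ k, d.getD k [] = evens.filter (fun y => PySem.Str.len y == k) := by
    intro k
    rw [hmap, PySem.Dict.getD_foldl_modify_append, PySem.Dict.getD_empty,
      List.nil_append, List.filter_map, List.map_map]
    simp [Function.comp_def]
  rw [PySem.List.foldl_append_eq_flatMap, List.nil_append, hkeys]
  rw [show (fun k => d.getD k []) = fun k => evens.filter (fun y => PySem.Str.len y == k) from
    funext hgetD]
  exact stable_sort_eq_buckets (fun w => PySem.Str.len w) evens
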